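-- pv_equiv track=rewrite | github.com/Hakyoungan/pps | week3/A032_안하경_20240715.py | solution
-- ===== SOURCE A (Python) =====
-- def solution(k, n):
--     # 2차원 배열 초기화
--     apartment = [[0] * (n + 1) for _ in range(k + 1)]
--
--     # 0층 초기화
--     for i in range(1, n + 1):
--         apartment[0][i] = i
--
--     # 각 층의 각 호에 대한 사람 수 계산
--     for floor in range(1, k + 1):
--         for room in range(1, n + 1):
--             apartment[floor][room] = apartment[floor][room - 1] + apartment[floor - 1][room]
--
--     return apartment[k][n]
-- ===== SOURCE B (Python) =====
-- def solution(k, n):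
--     # closed form: people in floor k room n = C(n + k, k + 1),
--     # computed as a running product of min(k + 1, n - 1) factors
--     m = n + k
--     r = k + 1
--     if m - r < r:
--         r = m - r
--     if r < 0:
--         return 0
--     num = 1
--     for i in range(1, r + 1):
--         num = num * (m - r + i) // i
--     return num
-- ===== Notes on version B (the rewrite author's own statement) =====
-- stated objective: faster
-- what changed: Replaces the O(k*n) dynamic-programming table with the closed-form binomial coefficient C(n+k, k+1), computed as a running product of min(k+1, n-1) factors using exact integer division.
import Mathlib
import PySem

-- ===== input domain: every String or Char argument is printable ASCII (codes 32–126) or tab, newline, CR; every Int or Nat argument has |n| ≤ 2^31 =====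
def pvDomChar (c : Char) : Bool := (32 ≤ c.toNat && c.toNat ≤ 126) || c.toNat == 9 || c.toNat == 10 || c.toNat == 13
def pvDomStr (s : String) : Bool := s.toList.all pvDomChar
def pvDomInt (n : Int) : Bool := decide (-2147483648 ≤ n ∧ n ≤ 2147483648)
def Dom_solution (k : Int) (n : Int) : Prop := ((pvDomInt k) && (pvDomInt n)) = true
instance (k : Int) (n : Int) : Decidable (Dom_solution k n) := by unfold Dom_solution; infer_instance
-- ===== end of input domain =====

-- B replaces A's O(k*n) dynamic-programming table by the closed-form binomial
-- coefficient C(n+k, k+1), computed as a running product of min(k+1, n-1) factors.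
-- Equivalence is about the RETURN value; A mutates only its own local lists.

-- ===== PORT A =====
-- apartment[i][j] read/write helpers (list-of-lists with in-place assignment)
def get2 (a : List (List Int)) (i j : Nat) : Int := (a.getD i []).getD j 0
def set2 (a : List (List Int)) (i j : Nat) (v : Int) : List (List Int) :=
  a.set i ((a.getD i []).set j v)

def solution (k : Int) (n : Int) : Int :=
  -- apartment = [[0] * (n + 1) for _ in range(k + 1)]
  let init : List (List Int) :=
    (List.range (k + 1).toNat).map (fun _ => List.replicate (n + 1).toNat 0)
  -- for i in range(1, n + 1): apartment[0][i] = i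
  let a0 := (PySem.List.pyRange 1 (n + 1) 1).foldl (fun a i => set2 a 0 i.toNat i) init
  -- for floor in range(1, k + 1): for room in range(1, n + 1): ...
  let a2 := (PySem.List.pyRange 1 (k + 1) 1).foldl (fun a floor =>
    (PySem.List.pyRange 1 (n + 1) 1).foldl (fun a room =>
      set2 a floor.toNat room.toNat
        (get2 a floor.toNat (room.toNat - 1) + get2 a (floor.toNat - 1) room.toNat)) a) a0
  -- return apartment[k][n]  (Pre_ guarantees the indices exist)
  get2 a2 k.toNat n.toNat

-- ===== PORT B =====
def solution_alt (k : Int) (n : Int) : Int :=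
  let m := n + k
  let r0 := k + 1
  let r := if m - r0 < r0 then m - r0 else r0
  if r < 0 then 0
  else (PySem.List.pyRange 1 (r + 1) 1).foldl
    (fun num i => PySem.Int.floordiv (num * (m - r + i)) i) 1

-- ===== PRECONDITION & SPEC =====
-- A raises IndexError as soon as k < 0 or n < 0 (empty row list / empty rows).
def Pre_solution (k : Int) (n : Int) : Prop := 0 ≤ k ∧ 0 ≤ n
instance (k : Int) (n : Int) : Decidable (Pre_solution k n) := by unfold Pre_solution; infer_instance
def pvWitness_solution : Int × Int := (2, 3)

def Spec_solution (k : Int) (n : Int) (out : Int) : Prop := out = solution_alt k n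
instance (k : Int) (n : Int) (out : Int) : Decidable (Spec_solution k n out) := by unfold Spec_solution; infer_instance

-- ===== CLAIM (what is proved, stated in full; the proofs are below) =====
def Claim_equal_solution : Prop := ∀ (k : Int) (n : Int), Dom_solution k n → Pre_solution k n → Spec_solution k n (solution k n)

-- ===== LEMMAS AND PROOFS =====

-- the intended table entry: apartment[f][r] = C(f+r, f+1)
def C2 (f r : Nat) : Int := ((f + r).choose (f + 1) : Int)

-- row f after its scan has filled cells 1..j (cell 0 stays 0 = C2 f 0)
def rowF (f j N : Nat) : List Int :=
  (List.range N).map (fun r => if r ≤ j then C2 f r else 0)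

-- whole matrix state: floors < f finished, floor f filled up to column j, rest zero
def matS (k n f j : Nat) : List (List Int) :=
  (List.range (k + 1)).map (fun i =>
    if i < f then rowF i n (n + 1)
    else if i = f then rowF f j (n + 1)
    else List.replicate (n + 1) 0)

lemma C2_zero (f : Nat) : C2 f 0 = 0 := by
  simp [C2]

lemma C2_row0 (r : Nat) : C2 0 r = (r : Int) := by
  simp [C2, Nat.choose_one_right]

lemma C2_pascal (f j : Nat) (hf : 1 ≤ f) :
    C2 f j + C2 (f - 1) (j + 1) = C2 f (j + 1) := by
  obtain ⟨f', rfl⟩ : ∃ f', f = f' + 1 := ⟨f - 1, by omega⟩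
  simp only [C2, Nat.add_sub_cancel]
  have : f' + 1 + (j + 1) = (f' + 1 + j) + 1 := by omega
  rw [this, Nat.choose_succ_succ' (f' + 1 + j) (f' + 1)]
  have : f' + (j + 1) = f' + 1 + j := by omega
  rw [this]
  push_cast
  ring

lemma rowF_zero (f N : Nat) : rowF f 0 N = List.replicate N 0 := by
  apply List.ext_getElem
  · simp [rowF]
  · intro i h1 h2
    simp only [rowF, List.getElem_map, List.getElem_range, List.getElem_replicate]
    split
    · next hle =>
      have : i = 0 := Nat.le_zero.mp hle
      subst this
      exact C2_zero f
    · rfl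

lemma get2_matS_self (k n f j j' : Nat) (hf : f ≤ k) (hj' : j' ≤ n) :
    get2 (matS k n f j) f j' = if j' ≤ j then C2 f j' else 0 := by
  simp [get2, matS, rowF, List.getD_eq_getElem?_getD,
    (by omega : f < k + 1), (by omega : j' < n + 1)]

lemma get2_matS_lt (k n f j i r : Nat) (hi : i < f) (hf : f ≤ k) (hr : r ≤ n) :
    get2 (matS k n f j) i r = C2 i r := by
  simp [get2, matS, rowF, List.getD_eq_getElem?_getD,
    (by omega : i < k + 1), (by omega : r < n + 1), hi, hr]

lemma matS_init (k n : Nat) :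
    (List.range (k + 1)).map (fun _ => List.replicate (n + 1) (0 : Int)) = matS k n 0 0 := by
  apply List.ext_getElem
  · simp [matS]
  · intro i h1 h2
    simp only [matS, List.getElem_map, List.getElem_range]
    split
    · omega
    · split
      · next h => rw [rowF_zero]
      · rfl

lemma set2_matS (k n f j : Nat) (hf : f ≤ k) (hj : j + 1 ≤ n) :
    set2 (matS k n f j) f (j + 1) (C2 f (j + 1)) = matS k n f (j + 1) := by
  unfold set2
  have hrow : (matS k n f j).getD f [] = rowF f j (n + 1) := by
    simp [matS, List.getD_eq_getElem?_getD, (by omega : f < k + 1)]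
  rw [hrow]
  have hset : (rowF f j (n + 1)).set (j + 1) (C2 f (j + 1)) = rowF f (j + 1) (n + 1) := by
    apply List.ext_getElem
    · simp [rowF]
    · intro r h1 h2
      simp only [rowF, List.getElem_set, List.getElem_map, List.getElem_range]
      split_ifs <;> first | rfl | omega | (rename_i ha _; rw [ha])
  rw [hset]
  apply List.ext_getElem
  · simp [matS]
  · intro i h1 h2
    simp only [matS, List.getElem_set, List.getElem_map, List.getElem_range]
    split_ifs <;> first | rfl | omega

lemma matS_step (k n f : Nat) : matS k n f n = matS k n (f + 1) 0 := by
  apply List.ext_getElem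
  · simp [matS]
  · intro i h1 h2
    simp only [matS, List.getElem_map, List.getElem_range]
    rcases Nat.lt_trichotomy i f with h | h | h
    · rw [if_pos h, if_pos (by omega)]
    · subst h
      rw [if_neg (by omega), if_pos rfl, if_pos (by omega)]
    · rw [if_neg (by omega), if_neg (by omega), if_neg (by omega)]
      split
      · next he => rw [rowF_zero]
      · rfl

-- floor-0 initialisation loop fills row 0 with 0,1,...,n
lemma inner0 (k n j : Nat) (hj : j ≤ n) :
    (PySem.List.pyRange 1 ((j : Int) + 1) 1).foldl (fun a i => set2 a 0 i.toNat i)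
      (matS k n 0 0) = matS k n 0 j := by
  induction j with
  | zero => rw [PySem.List.pyRange_one_eq_nil (by omega)]; rfl
  | succ j ih =>
    rw [show ((j + 1 : Nat) : Int) + 1 = ((j : Int) + 1) + 1 by push_cast; ring]
    rw [PySem.List.pyRange_one_succ_right (by omega), List.foldl_append, ih (by omega)]
    simp only [List.foldl_cons, List.foldl_nil]
    have ht : ((j : Int) + 1).toNat = j + 1 := by omega
    rw [ht, show ((j : Int) + 1) = C2 0 (j + 1) by rw [C2_row0]; push_cast; ring]
    exact set2_matS k n 0 j (by omega) (by omega)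

-- one DP floor scan: row f computed left to right from row f-1
lemma innerDP (k n f j : Nat) (hf1 : 1 ≤ f) (hf : f ≤ k) (hj : j ≤ n) :
    (PySem.List.pyRange 1 ((j : Int) + 1) 1).foldl
      (fun a r => set2 a f r.toNat (get2 a f (r.toNat - 1) + get2 a (f - 1) r.toNat))
      (matS k n f 0) = matS k n f j := by
  induction j with
  | zero => rw [PySem.List.pyRange_one_eq_nil (by omega)]; rfl
  | succ j ih =>
    rw [show ((j + 1 : Nat) : Int) + 1 = ((j : Int) + 1) + 1 by push_cast; ring]
    rw [PySem.List.pyRange_one_succ_right (by omega), List.foldl_append, ih (by omega)]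
    simp only [List.foldl_cons, List.foldl_nil]
    have ht : ((j : Int) + 1).toNat = j + 1 := by omega
    rw [ht]
    have h1 : get2 (matS k n f j) f (j + 1 - 1) = C2 f j := by
      rw [Nat.add_sub_cancel, get2_matS_self k n f j j hf (by omega)]
      simp
    have h2 : get2 (matS k n f j) (f - 1) (j + 1) = C2 (f - 1) (j + 1) :=
      get2_matS_lt k n f j (f - 1) (j + 1) (by omega) hf (by omega)
    rw [h1, h2, C2_pascal f j hf1]
    exact set2_matS k n f j hf (by omega)

-- the outer floor loop
lemma outerDP (k n f : Nat) (hf : f ≤ k) :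
    (PySem.List.pyRange 1 ((f : Int) + 1) 1).foldl
      (fun a floor => (PySem.List.pyRange 1 ((n : Int) + 1) 1).foldl
        (fun a room => set2 a floor.toNat room.toNat
          (get2 a floor.toNat (room.toNat - 1) + get2 a (floor.toNat - 1) room.toNat)) a)
      (matS k n 0 n) = matS k n f n := by
  induction f with
  | zero =>
    rw [PySem.List.pyRange_one_eq_nil (show ((0 : Nat) : Int) + 1 ≤ 1 by norm_num)]; rfl
  | succ f ih =>
    rw [show ((f + 1 : Nat) : Int) + 1 = ((f : Int) + 1) + 1 by push_cast; ring]
    rw [PySem.List.pyRange_one_succ_right (show (1 : Int) ≤ (f : Int) + 1 by omega),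
      List.foldl_append, ih (by omega)]
    simp only [List.foldl_cons, List.foldl_nil]
    have ht : ((f : Int) + 1).toNat = f + 1 := by omega
    simp only [ht]
    rw [matS_step k n f]
    exact innerDP k n (f + 1) n (by omega) (by omega) (le_refl n)

-- A's port on nonnegative inputs computes the table entry C(k+n, k+1)
lemma solutionA_eq (k n : Nat) : solution (k : Int) (n : Int) = C2 k n := by
  unfold solution
  have hk1 : ((k : Int) + 1).toNat = k + 1 := by omega
  have hn1 : ((n : Int) + 1).toNat = n + 1 := by omega
  have hk0 : ((k : Int)).toNat = k := by omega
  have hn0 : ((n : Int)).toNat = n := by omega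
  simp only [hk1, hn1, hk0, hn0]
  rw [matS_init k n, inner0 k n n (le_refl n), outerDP k n k (le_refl k)]
  rw [get2_matS_self k n k n n (le_refl k) (le_refl n)]
  simp

-- B's product loop computes the binomial coefficient C(D+R, R)
lemma prodLoop (D R : Nat) :
    (PySem.List.pyRange 1 ((R : Int) + 1) 1).foldl
      (fun num i => PySem.Int.floordiv (num * ((D : Int) + i)) i) 1
      = (((D + R).choose R : Nat) : Int) := by
  induction R with
  | zero => rw [PySem.List.pyRange_one_eq_nil (by omega)]; simp
  | succ R ih =>
    rw [show ((R + 1 : Nat) : Int) + 1 = ((R : Int) + 1) + 1 by push_cast; ring]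
    rw [PySem.List.pyRange_one_succ_right (by omega), List.foldl_append, ih]
    simp only [List.foldl_cons, List.foldl_nil]
    have hmul : (D + R + 1) * (D + R).choose R = (D + R + 1).choose (R + 1) * (R + 1) :=
      Nat.add_one_mul_choose_eq (D + R) R
    have hnum : (((D + R).choose R : Nat) : Int) * ((D : Int) + ((R : Int) + 1))
        = (((D + R + 1).choose (R + 1) * (R + 1) : Nat) : Int) := by
      rw [← hmul]; push_cast; ring
    rw [hnum, show ((R : Int) + 1) = ((R + 1 : Nat) : Int) by push_cast; ring,
      PySem.Int.floordiv_natCast, Nat.mul_div_cancel _ (by omega)]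
    norm_num [show D + (R + 1) = D + R + 1 by omega]

-- B's port on nonnegative inputs computes C(n+k, k+1)
lemma solutionB_eq (k n : Nat) : solution_alt (k : Int) (n : Int) = C2 k n := by
  unfold solution_alt
  simp only []
  by_cases hlt : (n : Int) + (k : Int) - ((k : Int) + 1) < (k : Int) + 1
  · rw [if_pos hlt]
    rcases Nat.eq_zero_or_pos n with hn0 | hn1
    · subst hn0
      rw [if_pos (by omega)]
      simp [C2]
    · rw [if_neg (by omega)]
      have hr : (n : Int) + (k : Int) - ((k : Int) + 1) = ((n - 1 : Nat) : Int) := by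
        push_cast [hn1]; ring
      have hD : (n : Int) + (k : Int) - ((n - 1 : Nat) : Int)
          = ((k + 1 : Nat) : Int) := by push_cast [hn1]; ring
      simp only [hr]
      simp only [hD]
      rw [prodLoop (k + 1) (n - 1)]
      have : (k + 1) + (n - 1) = n + k := by omega
      rw [this, show n - 1 = n + k - (k + 1) by omega,
        Nat.choose_symm (by omega : k + 1 ≤ n + k)]
      simp [C2, Nat.add_comm]
  · rw [if_neg hlt, if_neg (by omega)]
    have hn1 : 1 ≤ n := by omega
    have hr : (n : Int) + (k : Int) - ((k : Int) + 1) ≥ (k : Int) + 1 := by omega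
    have hrk : ((k : Int) + 1) = ((k + 1 : Nat) : Int) := by push_cast; ring
    have hD : (n : Int) + (k : Int) - ((k + 1 : Nat) : Int) = ((n - 1 : Nat) : Int) := by
      push_cast [hn1]; ring
    simp only [hrk]
    simp only [hD]
    rw [prodLoop (n - 1) (k + 1)]
    rw [show (n - 1) + (k + 1) = n + k by omega]
    simp [C2, Nat.add_comm]

theorem solution_spec : Claim_equal_solution := by
  intro k n hdom hpre
  unfold Spec_solution
  obtain ⟨hk, hn⟩ := hpre
  obtain ⟨k', rfl⟩ : ∃ k' : Nat, k = (k' : Int) := ⟨k.toNat, (Int.toNat_of_nonneg hk).symm⟩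
  obtain ⟨n', rfl⟩ : ∃ n' : Nat, n = (n' : Int) := ⟨n.toNat, (Int.toNat_of_nonneg hn).symm⟩
  rw [solutionA_eq, solutionB_eq]
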